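-- pv_equiv track=rewrite | github.com/Ramya-Adepu/cp | 04-recursion_powersof3ton-Python/recursion_powersof3ton.py | recursion_powersof3ton
-- ===== SOURCE A (Python) =====
-- def recursion_powersof3ton(n):
-- 	# Your code goes here
-- 	if(n<1):
-- 		return None
-- 	else:
-- 		k=n//3
-- 		i=0
-- 		a=[]
-- 		while i<k+1:
-- 			x=3**i
-- 			if(x<=n):
-- 				a.append(3**i)
-- 			i+=1
-- 		return a
-- ===== SOURCE B (Python) =====
-- def recursion_powersof3ton(n):
--     if n < 1:
--         return None
--     a = []
--     p = 1
--     while p <= n: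
--         a.append(p)
--         p *= 3
--     return a
-- ===== Notes on version B (the rewrite author's own statement) =====
-- stated objective: faster
-- what changed: Replaces the O(n) loop over all i up to n//3 (each computing 3**i twice by exponentiation) with a single multiply-by-3 loop that stops as soon as the power exceeds n, doing only O(log n) iterations.
import Mathlib
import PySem

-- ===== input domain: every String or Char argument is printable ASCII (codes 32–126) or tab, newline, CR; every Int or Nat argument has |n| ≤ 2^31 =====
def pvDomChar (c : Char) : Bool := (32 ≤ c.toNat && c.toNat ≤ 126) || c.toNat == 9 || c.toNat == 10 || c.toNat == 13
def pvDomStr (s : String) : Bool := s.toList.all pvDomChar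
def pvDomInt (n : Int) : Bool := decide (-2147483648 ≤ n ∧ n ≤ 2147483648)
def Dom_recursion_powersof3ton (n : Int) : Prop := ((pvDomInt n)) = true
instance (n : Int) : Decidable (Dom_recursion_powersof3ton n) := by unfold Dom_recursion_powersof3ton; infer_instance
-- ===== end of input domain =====

-- B replaces A's scan of all i ≤ n//3 (computing 3**i by exponentiation each time)
-- with a multiply-by-3 loop that stops once the power exceeds n: O(log n) iterations.

-- ===== PORT A =====
-- A's while loop: i counts 0,1,… while i < k+1; fuel (k+1).toNat is exactly the
-- number of iterations, so the port runs the loop body on i = 0,…,k like Python.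
def pvGoA (n k : Int) (fuel : Nat) (i : Int) (a : List Int) : List Int :=
  match fuel with
  | 0 => a
  | f + 1 =>
    if i < k + 1 then
      -- x = 3**i (inlined); i ≥ 0 on every reached state
      pvGoA n k f (i + 1) (if (3 : Int) ^ i.toNat ≤ n then a ++ [(3 : Int) ^ i.toNat] else a)
    else a

def recursion_powersof3ton (n : Int) : Option (List Int) :=
  if n < 1 then none
  else
    let k := PySem.Int.floordiv n 3
    some (pvGoA n k (k + 1).toNat 0 [])

-- ===== PORT B =====
-- B's while loop: p runs over the powers of 3; hp (0 < p, an invariant of B's loop)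
-- only justifies termination.
def pvGoB (n : Int) (p : Int) (hp : 0 < p) (a : List Int) : List Int :=
  if h : p ≤ n then pvGoB n (3 * p) (by omega) (a ++ [p]) else a
  termination_by (n + 1 - p).toNat
  decreasing_by omega

def recursion_powersof3ton_alt (n : Int) : Option (List Int) :=
  if n < 1 then none
  else some (pvGoB n 1 (by omega) [])

-- ===== PRECONDITION & SPEC =====
def Spec_recursion_powersof3ton (n : Int) (out : Option (List Int)) : Prop := out = recursion_powersof3ton_alt n
instance (n : Int) (out : Option (List Int)) : Decidable (Spec_recursion_powersof3ton n out) := by unfold Spec_recursion_powersof3ton; infer_instance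

-- ===== CLAIM (what is proved, stated in full; the proofs are below) =====
def Claim_equal_recursion_powersof3ton : Prop := ∀ (n : Int), Dom_recursion_powersof3ton n → Spec_recursion_powersof3ton n (recursion_powersof3ton n)

-- ===== LEMMAS AND PROOFS =====

-- 3^m ≥ 3m, so the first power of 3 exceeding n appears at an index ≤ n//3.
lemma pv_pow3_ge (m : Nat) : (3 : Int) * m ≤ 3 ^ m := by
  induction m with
  | zero => norm_num
  | succ m ih =>
    have h1 : (1 : Int) ≤ 3 ^ m := one_le_pow₀ (by norm_num)
    have : (3 : Int) ^ (m + 1) = 3 * 3 ^ m := by ring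
    push_cast
    omega

-- Once 3^i exceeds n, A's remaining iterations append nothing.
lemma pv_goA_done (n k : Int) (f : Nat) (i : Int) (a : List Int)
    (hi : 0 ≤ i) (h : n < 3 ^ i.toNat) : pvGoA n k f i a = a := by
  induction f generalizing i a with
  | zero => rfl
  | succ f ih =>
    unfold pvGoA
    split
    · rw [if_neg (by omega)]
      apply ih _ _ (by omega)
      have : (3 : Int) ^ (i + 1).toNat = 3 * 3 ^ i.toNat := by
        rw [show (i + 1).toNat = i.toNat + 1 by omega]; ring
      have h1 : (1 : Int) ≤ 3 ^ i.toNat := one_le_pow₀ (by norm_num)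
      omega
    · rfl

-- pvGoB only depends on the value of p (its proof argument is irrelevant).
lemma pv_goB_congr (n p q : Int) (hp : 0 < p) (hq : 0 < q) (a : List Int)
    (h : p = q) : pvGoB n p hp a = pvGoB n q hq a := by subst h; rfl

-- Main invariant: with fuel f = k+1-i remaining and p = 3^i, the two loops agree.
lemma pv_main (n k : Int) (hk : 3 * k ≤ n ∧ n < 3 * k + 3) :
    ∀ (f : Nat) (i : Int) (a : List Int), 0 ≤ i → i + f = k + 1 →
      pvGoA n k f i a = pvGoB n ((3 : Int) ^ i.toNat) (pow_pos (by norm_num) _) a := by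
  intro f
  induction f with
  | zero =>
    intro i a hi hf
    -- i = k+1, and 3^(k+1) ≥ 3(k+1) > n, so B's loop also stops.
    have hik : i = k + 1 := by omega
    have h3 : (3 : Int) * (i.toNat : Int) ≤ 3 ^ i.toNat := pv_pow3_ge i.toNat
    have hit : (i.toNat : Int) = k + 1 := by omega
    rw [pvGoB]
    rw [dif_neg (by omega)]
    rfl
  | succ f ih =>
    intro i a hi hf
    unfold pvGoA
    rw [if_pos (by omega)]
    by_cases hx : (3 : Int) ^ i.toNat ≤ n
    · rw [if_pos hx, ih (i + 1) (a ++ [(3 : Int) ^ i.toNat]) (by omega) (by omega)]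
      conv_rhs => rw [pvGoB, dif_pos hx]
      exact pv_goB_congr _ _ _ _ _ _
        (by rw [show (i + 1).toNat = i.toNat + 1 by omega]; ring)
    · rw [if_neg hx]
      have h1 : (1 : Int) ≤ 3 ^ i.toNat := one_le_pow₀ (by norm_num)
      rw [pv_goA_done n k f (i + 1) a (by omega)
        (by rw [show (i + 1).toNat = i.toNat + 1 by omega]
            have : (3 : Int) ^ (i.toNat + 1) = 3 * 3 ^ i.toNat := by ring
            omega)]
      rw [pvGoB, dif_neg hx]

-- ===== VERDICT (by name: the statement is the Claim_ definition above) =====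
theorem recursion_powersof3ton_spec : Claim_equal_recursion_powersof3ton := by
  intro n _
  unfold Spec_recursion_powersof3ton recursion_powersof3ton recursion_powersof3ton_alt
  by_cases hn : n < 1
  · rw [if_pos hn, if_pos hn]
  · rw [if_neg hn, if_neg hn]
    rw [Int.not_lt] at hn
    set k := PySem.Int.floordiv n 3 with hk
    have hkd : 3 * k ≤ n ∧ n < 3 * k + 3 := by
      rw [hk, PySem.Int.floordiv_eq_ediv_of_pos (by omega)]
      omega
    have hk0 : 0 ≤ k := by omega
    have := pv_main n k hkd (k + 1).toNat 0 [] (by omega) (by omega)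
    simp only [Int.toNat_zero, pow_zero] at this
    exact congrArg Option.some this
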